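-- pv_equiv track=rewrite | github.com/LeireQ/theegg_ai | tarea_23/Tarea_23.py | MovimientoComodines
-- ===== SOURCE A (Python) =====
-- def DesplazamientoArray(baraja,index):
--     if index < len(baraja)-1:
--         baraja[index],baraja[index+1] = baraja[index+1],baraja[index]
--     else:
--         baraja[1:] = baraja[-1:] + baraja[1:-1]
--
-- def MovimientoComodines(baraja):
--     indexA = baraja.index(53)
--     DesplazamientoArray(baraja,indexA)
--     indexB = baraja.index(54)
--     for i in range(2):
--         indexB = baraja.index(54)
--         DesplazamientoArray(baraja,indexB)
--     return baraja
-- ===== SOURCE B (Python) =====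
-- def MovimientoComodines(baraja):
--     # One closed-form placement per joker: pop it and reinsert at the
--     # circularly computed target, instead of repeated swap/rotate steps.
--     n = len(baraja)
--     for card, k in ((53, 1), (54, 2)):
--         i = baraja.index(card)
--         baraja.pop(i)
--         baraja.insert((i - 1 + k) % (n - 1) + 1, card)
--     return baraja
-- ===== Notes on version B (the rewrite author's own statement) =====
-- stated objective: simpler
-- what changed: A shifts each joker by repeated swap/slice-rotation steps (a helper called once for 53 and twice in a loop for 54); B pops each joker once and reinserts it at a single closed-form circular target ((i-1+k) % (n-1)) + 1, eliminating the helper and the loop.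
-- outside the precondition, e.g. on MovimientoComodines([53, 99, 54, 54, 98]): A returns [99, 53, 54, 54, 98], B returns [99, 53, 54, 98, 54]
import Mathlib
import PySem

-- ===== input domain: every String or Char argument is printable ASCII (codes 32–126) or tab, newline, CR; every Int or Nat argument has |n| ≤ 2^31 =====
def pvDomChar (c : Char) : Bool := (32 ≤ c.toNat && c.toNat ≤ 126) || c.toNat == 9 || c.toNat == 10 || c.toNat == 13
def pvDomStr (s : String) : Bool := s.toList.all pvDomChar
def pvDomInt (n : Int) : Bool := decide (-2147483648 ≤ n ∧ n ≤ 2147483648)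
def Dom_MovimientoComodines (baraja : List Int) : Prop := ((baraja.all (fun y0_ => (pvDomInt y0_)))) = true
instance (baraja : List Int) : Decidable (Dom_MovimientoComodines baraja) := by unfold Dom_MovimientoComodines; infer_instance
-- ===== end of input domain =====

-- B replaces A's swap/rotate helper iterated per joker by one pop + closed-form modular
-- reinsertion per joker (objective: simpler). Both Pythons mutate the argument list in
-- place and return it; the equivalence proved here is about the returned value.

-- ===== PORT A =====
-- baraja[index],baraja[index+1] = baraja[index+1],baraja[index]  /  baraja[1:] = baraja[-1:] + baraja[1:-1]
def DesplazamientoArray (baraja : List Int) (index : Nat) : List Int :=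
  if (index : Int) < (baraja.length : Int) - 1 then
    (baraja.set index (baraja.getD (index + 1) 0)).set (index + 1) (baraja.getD index 0)
  else
    baraja.take 1 ++ PySem.List.slice baraja (some (-1)) none
      ++ PySem.List.slice baraja (some 1) (some (-1))

def MovimientoComodines (baraja : List Int) : List Int :=
  match PySem.List.index? baraja 53 with
  | none => baraja            -- ValueError: 53 not in deck (outside Pre_)
  | some indexA =>
    let b1 := DesplazamientoArray baraja indexA
    match PySem.List.index? b1 54 with   -- the (dead) pre-loop lookup; ValueError if absent
    | none => b1
    | some _ =>
      (List.range 2).foldl (fun b _ =>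
        match PySem.List.index? b 54 with
        | none => b           -- ValueError (outside Pre_)
        | some indexB => DesplazamientoArray b indexB) b1

-- ===== PORT B =====
-- one iteration of Source B's loop: pop the card, reinsert at ((i-1+k) % (n-1)) + 1
def pvColoca (baraja : List Int) (n : Int) (card : Int) (k : Int) : List Int :=
  match PySem.List.index? baraja card with
  | none => baraja            -- ValueError (outside Pre_)
  | some i =>
    match PySem.List.pop? baraja (i : Int) with
    | none => baraja
    | some r => PySem.List.insert r.2 (PySem.Int.mod ((i : Int) - 1 + k) (n - 1) + 1) card

def MovimientoComodines_alt (baraja : List Int) : List Int :=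
  let n : Int := baraja.length
  pvColoca (pvColoca baraja n 53 1) n 54 2

-- ===== PRECONDITION & SPEC =====
-- Pre_ excludes decks missing a joker (A raises ValueError there) and decks holding 54 more
-- than once, a corner on which A's repeated find-first two-step may move two different
-- duplicate cards — accidental behaviour no deck semantics specifies.
def Pre_MovimientoComodines (baraja : List Int) : Prop :=
  (53 : Int) ∈ baraja ∧ PySem.List.count baraja 54 = 1
instance (baraja : List Int) : Decidable (Pre_MovimientoComodines baraja) := by
  unfold Pre_MovimientoComodines; infer_instance

def pvWitness_MovimientoComodines : List Int := [53, 54]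

def Spec_MovimientoComodines (baraja : List Int) (out : List Int) : Prop :=
  out = MovimientoComodines_alt baraja
instance (baraja : List Int) (out : List Int) : Decidable (Spec_MovimientoComodines baraja out) := by
  unfold Spec_MovimientoComodines; infer_instance

-- ===== CLAIM (what is proved, stated in full; the proofs are below) =====
def Claim_equal_MovimientoComodines : Prop :=
  ∀ (baraja : List Int), Dom_MovimientoComodines baraja → Pre_MovimientoComodines baraja →
    Spec_MovimientoComodines baraja (MovimientoComodines baraja)

-- ===== LEMMAS AND PROOFS =====

-- one "find the card and shift it" step of A (proof-side abbreviation of A's loop body)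
def pvA (b : List Int) (card : Int) : List Int :=
  match PySem.List.index? b card with
  | none => b
  | some i => DesplazamientoArray b i

lemma movA_eq (l : List Int) (h53 : (53 : Int) ∈ l) (h54 : (54 : Int) ∈ pvA l 53) :
    MovimientoComodines l = pvA (pvA (pvA l 53) 54) 54 := by
  unfold MovimientoComodines pvA
  rcases h : PySem.List.index? l 53 with _ | i
  · rw [PySem.List.index?_eq_none_iff] at h; exact absurd h53 h
  · unfold pvA at h54
    rw [h] at h54
    rcases h2 : PySem.List.index? (DesplazamientoArray l i) 54 with _ | j
    · rw [PySem.List.index?_eq_none_iff] at h2; exact absurd h54 h2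
    · simp only [List.range_succ, List.range_zero, List.nil_append, List.cons_append,
        List.foldl_cons, List.foldl_nil, h2]

lemma swap_set (pre suf : List Int) (c x : Int) :
    ((pre ++ c :: x :: suf).set pre.length ((pre ++ c :: x :: suf).getD (pre.length + 1) 0)).set
      (pre.length + 1) ((pre ++ c :: x :: suf).getD pre.length 0) = pre ++ x :: c :: suf := by
  induction pre with
  | nil => simp
  | cons p ps ih => simp [ih]

lemma despl_swap (pre suf : List Int) (c x : Int) :
    DesplazamientoArray (pre ++ c :: x :: suf) pre.length = pre ++ x :: c :: suf := by
  unfold DesplazamientoArray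
  rw [if_pos (by simp; omega)]
  exact swap_set pre suf c x

lemma despl_last (p0 : Int) (rest : List Int) (c : Int) :
    DesplazamientoArray ((p0 :: rest) ++ [c]) (rest.length + 1) = p0 :: c :: rest := by
  unfold DesplazamientoArray
  rw [if_neg (by simp)]
  rw [PySem.List.slice_from_neg_one]
  simp [PySem.List.slice, PySem.List.clampIdx, List.take_append]
  rw [if_neg (by omega)]
  simp [List.take_left' (l₂ := [c]) (l₁ := rest) rfl]

lemma erase_mid (pre suf : List Int) (c : Int) :
    (pre ++ c :: suf).eraseIdx pre.length = pre ++ suf := by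
  induction pre with
  | nil => simp
  | cons p ps ih => simpa using ih

lemma coloca_eq (pre suf : List Int) (c k n : Int) (hc : c ∉ pre) :
    pvColoca (pre ++ c :: suf) n c k =
      PySem.List.insert (pre ++ suf) (PySem.Int.mod ((pre.length : Int) - 1 + k) (n - 1) + 1) c := by
  have hidx : PySem.List.index? (pre ++ c :: suf) c = some pre.length := by
    rw [PySem.List.index?_eq_some_iff]; exact ⟨pre, suf, rfl, rfl, hc⟩
  have hlt : pre.length < (pre ++ c :: suf).length := by simp
  simp only [pvColoca, hidx, PySem.List.pop?_natCast _ _ hlt, erase_mid]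

lemma mod_eval (a d r : Int) (hd : 0 < d) (h0 : 0 ≤ r) (hr : r < d)
    (hq : a = r ∨ a = d + r ∨ a = d + d + r) : PySem.Int.mod a d = r := by
  rw [PySem.Int.mod_eq_emod_of_pos hd]
  rcases hq with rfl | rfl | rfl
  · exact Int.emod_eq_of_lt h0 hr
  · rw [show d + r = r + d * 1 by ring, Int.add_mul_emod_self_left]
    exact Int.emod_eq_of_lt h0 hr
  · rw [show d + d + r = r + d * 2 by ring, Int.add_mul_emod_self_left]
    exact Int.emod_eq_of_lt h0 hr

lemma ins_eval (l1 l2 : List Int) (c : Int) :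
    PySem.List.insert (l1 ++ l2) ((l1.length : Int)) c = l1 ++ c :: l2 := by
  rw [PySem.List.insert_natCast _ _ _ (by simp)]
  simp

-- step for 53 (k = 1): A's single shift equals B's closed-form reinsertion
lemma step1_eq (pre suf : List Int) (n : Int) (hc : (53 : Int) ∉ pre)
    (hne : 1 ≤ pre.length + suf.length)
    (hn : n = ((pre.length + suf.length + 1 : Nat) : Int)) :
    pvA (pre ++ 53 :: suf) 53 = pvColoca (pre ++ 53 :: suf) n 53 1 := by
  have hidx : PySem.List.index? (pre ++ 53 :: suf) 53 = some pre.length := by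
    rw [PySem.List.index?_eq_some_iff]; exact ⟨pre, suf, rfl, rfl, hc⟩
  rw [coloca_eq pre suf 53 1 n hc]
  simp only [pvA, hidx]
  rcases suf with _ | ⟨x, suf'⟩
  · -- 53 is last: rotate; target = 1
    rcases pre with _ | ⟨p0, ps⟩
    · simp at hne
    · rw [show (p0 :: ps).length = ps.length + 1 from rfl, despl_last]
      rw [mod_eval _ _ 0 (by simp at hn; omega) le_rfl (by simp at hn; omega)
        (by simp at hn ⊢; omega)]
      rw [show ((0 : Int) + 1) = (([p0] : List Int).length : Int) by simp]
      rw [show p0 :: ps ++ ([] : List Int) = [p0] ++ ps by simp, ins_eval]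
      simp
  · -- swap with successor; target = pre.length + 1
    rw [despl_swap]
    rw [mod_eval _ _ (pre.length : Int) (by simp at hn; omega) (by positivity)
      (by simp at hn; omega) (by left; ring)]
    rw [show ((pre.length : Int) + 1) = (((pre ++ [x]).length : Int)) by simp]
    rw [show pre ++ x :: suf' = (pre ++ [x]) ++ suf' by simp, ins_eval]
    simp

-- double step for 54 (k = 2): two of A's shifts equal B's closed-form reinsertion
lemma step2_eq (pre suf : List Int) (n : Int) (hc : (54 : Int) ∉ pre) (hs : (54 : Int) ∉ suf)
    (hne : 1 ≤ pre.length + suf.length)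
    (hn : n = ((pre.length + suf.length + 1 : Nat) : Int)) :
    pvA (pvA (pre ++ 54 :: suf) 54) 54 = pvColoca (pre ++ 54 :: suf) n 54 2 := by
  have hidx : PySem.List.index? (pre ++ 54 :: suf) 54 = some pre.length := by
    rw [PySem.List.index?_eq_some_iff]; exact ⟨pre, suf, rfl, rfl, hc⟩
  rw [coloca_eq pre suf 54 2 n hc]
  rcases suf with _ | ⟨x, suf'⟩
  · -- 54 is last: rotate, then swap forward (or rotate again when n = 2)
    rcases pre with _ | ⟨p0, ps⟩
    · simp at hne
    · have h1 : pvA ((p0 :: ps) ++ [54]) 54 = p0 :: 54 :: ps := by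
        simp only [pvA, hidx]
        rw [show (p0 :: ps).length = ps.length + 1 from rfl, despl_last]
      rw [h1]
      have hps : ¬ ((54 : Int) = p0) := fun h => hc (by simp [← h])
      rcases ps with _ | ⟨q, ps'⟩
      · -- n = 2 : the second step rotates in place
        have hidx2 : PySem.List.index? [p0, (54 : Int)] 54 = some 1 := by
          rw [PySem.List.index?_eq_some_iff]
          exact ⟨[p0], [], rfl, rfl, by simpa using hps⟩
        have h2 : pvA [p0, (54 : Int)] 54 = [p0, 54] := by
          simp only [pvA, hidx2]
          rw [show (1 : Nat) = ([] : List Int).length + 1 from rfl,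
            show [p0, (54 : Int)] = (p0 :: ([] : List Int)) ++ [54] from rfl, despl_last]
          simp
        rw [h2]
        rw [mod_eval _ _ 0 (by simp at hn; omega) le_rfl (by simp at hn; omega)
          (by simp at hn ⊢; omega)]
        rw [show ((0 : Int) + 1) = (([p0] : List Int).length : Int) by simp]
        rw [show p0 :: ([] : List Int) ++ ([] : List Int) = [p0] ++ [] by simp, ins_eval]
        simp
      · -- n ≥ 3 : the second step swaps 54 forward past the old head
        have hidx2 : PySem.List.index? (p0 :: 54 :: q :: ps') 54 = some 1 := by
          rw [PySem.List.index?_eq_some_iff]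
          exact ⟨[p0], q :: ps', rfl, rfl, by simpa using hps⟩
        have h2 : pvA (p0 :: (54 : Int) :: q :: ps') 54 = p0 :: q :: 54 :: ps' := by
          simp only [pvA, hidx2]
          rw [show (1 : Nat) = ([p0] : List Int).length from rfl,
            show p0 :: (54 : Int) :: q :: ps' = [p0] ++ 54 :: q :: ps' from rfl, despl_swap]
          simp
        rw [h2]
        rw [mod_eval _ _ 1 (by simp at hn; omega) (by omega) (by simp at hn; omega)
          (by simp at hn ⊢; omega)]
        rw [show ((1 : Int) + 1) = (([p0, q] : List Int).length : Int) by simp]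
        rw [show p0 :: q :: ps' ++ ([] : List Int) = [p0, q] ++ ps' by simp, ins_eval]
        simp
  · -- 54 has a successor: first step swaps it with x
    have h54x : ¬ ((54 : Int) = x) := fun h => hs (by simp [← h])
    have hc' : (54 : Int) ∉ pre ++ [x] := by
      simp only [List.mem_append, List.mem_singleton]
      rintro (h | h)
      · exact hc h
      · exact h54x h
    have h1 : pvA (pre ++ 54 :: x :: suf') 54 = (pre ++ [x]) ++ 54 :: suf' := by
      simp only [pvA, hidx]
      rw [despl_swap]; simp
    rw [h1]
    have hidx2 : PySem.List.index? ((pre ++ [x]) ++ 54 :: suf') 54 = some (pre ++ [x]).length := by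
      rw [PySem.List.index?_eq_some_iff]; exact ⟨pre ++ [x], suf', rfl, rfl, hc'⟩
    rcases suf' with _ | ⟨y, suf''⟩
    · -- 54 now last: second step rotates it to position 1
      have h2 : pvA ((pre ++ [x]) ++ [54]) 54 = ((pre ++ [x]).headI) :: 54 :: (pre ++ [x]).tail := by
        simp only [pvA, hidx2]
        rcases pre with _ | ⟨p0, ps⟩
        · rw [show (([] : List Int) ++ [x]).length = ([] : List Int).length + 1 from rfl]
          rw [show (([] : List Int) ++ [x]) ++ [54] = (x :: ([] : List Int)) ++ [54] by simp]
          rw [despl_last]; simp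
        · rw [show ((p0 :: ps) ++ [x]).length = (ps ++ [x]).length + 1 by simp]
          rw [show ((p0 :: ps) ++ [x]) ++ [54] = (p0 :: (ps ++ [x])) ++ [54] by simp]
          rw [despl_last]; simp
      rw [h2]
      rw [mod_eval _ _ 0 (by simp at hn; omega) le_rfl (by simp at hn; omega)
        (by simp at hn ⊢; omega)]
      rcases pre with _ | ⟨p0, ps⟩
      · rw [show ((0 : Int) + 1) = (([x] : List Int).length : Int) by simp]
        rw [show ([] : List Int) ++ [x] = [x] ++ [] by simp, ins_eval]
        simp
      · rw [show ((0 : Int) + 1) = (([p0] : List Int).length : Int) by simp]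
        rw [show (p0 :: ps) ++ [x] = [p0] ++ (ps ++ [x]) by simp, ins_eval]
        simp
    · -- 54 still has a successor y: second step swaps again
      have h2 : pvA ((pre ++ [x]) ++ 54 :: y :: suf'') 54 = (pre ++ [x]) ++ y :: 54 :: suf'' := by
        simp only [pvA, hidx2]
        rw [despl_swap]
      rw [h2]
      rw [mod_eval _ _ ((pre.length : Int) + 1) (by simp at hn; omega) (by positivity)
        (by simp at hn; omega) (by left; ring)]
      rw [show ((pre.length : Int) + 1 + 1) = (((pre ++ [x, y]) : List Int).length : Int) by
        simp; ring]
      rw [show pre ++ x :: y :: suf'' = (pre ++ [x, y]) ++ suf'' by simp, ins_eval]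
      simp

-- the 53-step permutes the deck, so membership / count / length carry over to it
lemma pvA53_perm (pre suf : List Int) (hc : (53 : Int) ∉ pre)
    (hne : 1 ≤ pre.length + suf.length) :
    (pvA (pre ++ 53 :: suf) 53).Perm (pre ++ 53 :: suf) := by
  have hidx : PySem.List.index? (pre ++ 53 :: suf) 53 = some pre.length := by
    rw [PySem.List.index?_eq_some_iff]; exact ⟨pre, suf, rfl, rfl, hc⟩
  simp only [pvA, hidx]
  rcases suf with _ | ⟨x, suf'⟩
  · rcases pre with _ | ⟨p0, ps⟩
    · simp at hne
    · rw [show (p0 :: ps).length = ps.length + 1 from rfl, despl_last]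
      exact List.Perm.cons p0 (List.perm_append_singleton 53 ps).symm
  · rw [despl_swap]
    exact List.Perm.append_left pre (List.Perm.swap 53 x suf')

-- ===== VERDICT (by name: the statement is the Claim_ definition above) =====
theorem MovimientoComodines_spec : Claim_equal_MovimientoComodines := by
  unfold Claim_equal_MovimientoComodines
  intro baraja _ hpre
  obtain ⟨h53, h54c⟩ := hpre
  rw [PySem.List.count_eq] at h54c
  unfold Spec_MovimientoComodines MovimientoComodines_alt
  dsimp only
  obtain ⟨i, hi⟩ := Option.isSome_iff_exists.mp ((PySem.List.index?_isSome_iff _ _).mpr h53)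
  obtain ⟨pre, suf, heq, hlen, hnp⟩ := (PySem.List.index?_eq_some_iff _ _ _).mp hi
  subst heq
  have h54 : (54 : Int) ∈ pre ++ 53 :: suf := List.count_pos_iff.mp (by omega)
  have hne : 1 ≤ pre.length + suf.length := by
    rcases pre with _ | _
    · rcases suf with _ | _
      · simp at h54
      · simp
    · simp; omega
  have hn : ((pre ++ 53 :: suf).length : Int) = ((pre.length + suf.length + 1 : Nat) : Int) := by
    push_cast [List.length_append, List.length_cons]; ring
  have hperm := pvA53_perm pre suf hnp hne
  have hmem54 : (54 : Int) ∈ pvA (pre ++ 53 :: suf) 53 := hperm.mem_iff.mpr h54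
  have hcnt : (pvA (pre ++ 53 :: suf) 53).count 54 = 1 := by rw [hperm.count_eq]; exact h54c
  obtain ⟨j, hj⟩ := Option.isSome_iff_exists.mp ((PySem.List.index?_isSome_iff _ _).mpr hmem54)
  obtain ⟨pre2, suf2, heq2, hlen2, hnp2⟩ := (PySem.List.index?_eq_some_iff _ _ _).mp hj
  have hns2 : (54 : Int) ∉ suf2 := by
    rw [heq2, List.count_append, List.count_cons] at hcnt
    have hp0 : pre2.count 54 = 0 := List.count_eq_zero.mpr hnp2
    have : suf2.count 54 = 0 := by simp [hp0] at hcnt; omega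
    exact List.count_eq_zero.mp this
  have hlen12 : (pvA (pre ++ 53 :: suf) 53).length = (pre ++ 53 :: suf).length :=
    hperm.length_eq
  have hne2 : 1 ≤ pre2.length + suf2.length := by
    rw [heq2] at hlen12; simp at hlen12; omega
  have hn2 : ((pre ++ 53 :: suf).length : Int) = ((pre2.length + suf2.length + 1 : Nat) : Int) := by
    rw [heq2] at hlen12; simp at hlen12 ⊢; omega
  rw [movA_eq _ h53 hmem54]
  rw [← step1_eq pre suf _ hnp hne hn]
  rw [heq2]
  exact step2_eq pre2 suf2 _ hnp2 hns2 hne2 hn2
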